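-- pv_equiv track=rewrite | github.com/SamHames/hyperreal | hyperreal/utilities.py | weight_bitslice
-- ===== SOURCE A (Python) =====
-- import heapq
-- import itertools
-- import operator
--
-- def weight_bitslice(bitslice):
--     """
--     Return an iterator of weights for each document in the bitslice.
--
--     """
--
--     # Can't be a lambda as we need to capture the layer eagerly
--     def slice_gen(bm, layer):
--         weight = 2**layer
--         for doc_id in bm:
--             yield (doc_id, weight)
--
--     # Returns them in merged order
--     ordered = heapq.merge(*(slice_gen(bm, i) for i, bm in enumerate(bitslice)))
--
--     grouped = itertools.groupby(ordered, key=operator.itemgetter(0))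
--
--     for key, group in grouped:
--         yield key, sum(g[1] for g in group)
-- ===== SOURCE B (Python) =====
-- def weight_bitslice(bitslice):
--     """
--     Return an iterator of weights for each document in the bitslice.
--
--     Explicit selection merge: repeatedly take the smallest current head among the
--     per-layer streams (earliest stream on ties) and accumulate runs of equal
--     doc_ids inline.
--     """
--     streams = [[(doc_id, 2 ** layer) for doc_id in bm] for layer, bm in enumerate(bitslice)]
--     pos = [0] * len(streams)
--     key = None
--     total = 0
--     have = False
--     while True:
--         # scan for the stream whose current head is smallest (first minimum wins)
--         best = -1
--         for j, s in enumerate(streams):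
--             if pos[j] < len(s) and (best < 0 or s[pos[j]] < streams[best][pos[best]]):
--                 best = j
--         if best < 0:
--             break
--         doc_id, weight = streams[best][pos[best]]
--         pos[best] += 1
--         if have and doc_id == key:
--             total += weight
--         else:
--             if have:
--                 yield key, total
--             key, total, have = doc_id, weight, True
--     if have:
--         yield key, total
-- ===== Notes on version B (the rewrite author's own statement) =====
-- stated objective: alternative
-- what changed: Replaces the heapq.merge-of-generators plus itertools.groupby pipeline with an explicit selection merge: one fused loop that scans the per-layer streams for the smallest current head and accumulates runs of equal doc_ids inline, using no library machinery.
import Mathlib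
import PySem

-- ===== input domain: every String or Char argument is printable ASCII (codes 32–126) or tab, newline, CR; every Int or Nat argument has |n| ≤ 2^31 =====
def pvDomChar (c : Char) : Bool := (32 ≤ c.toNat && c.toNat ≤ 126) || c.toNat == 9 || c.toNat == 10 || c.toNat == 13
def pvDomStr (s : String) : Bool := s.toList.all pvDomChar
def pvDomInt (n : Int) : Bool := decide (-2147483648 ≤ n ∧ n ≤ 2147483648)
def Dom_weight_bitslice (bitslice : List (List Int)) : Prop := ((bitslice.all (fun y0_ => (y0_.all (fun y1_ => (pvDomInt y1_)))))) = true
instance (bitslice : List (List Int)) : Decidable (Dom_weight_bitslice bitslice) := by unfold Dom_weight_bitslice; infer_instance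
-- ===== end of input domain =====

-- B replaces A's heapq.merge of per-layer generators + itertools.groupby with an explicit
-- selection merge (recursive pop-min over the streams) and inline accumulation of runs.
-- Both Pythons are generators; the equivalence is about the yielded sequence, materialised as a list.

-- ===== PORT A =====
-- Python tuple comparison (doc_id, weight) <= (doc_id', weight'): lexicographic.
def pyTupleLE (p q : Int × Int) : Bool := decide (p.1 < q.1) || (decide (p.1 = q.1) && decide (p.2 ≤ q.2))

-- '(slice_gen(bm, i) for i, bm in enumerate(bitslice))': each layer's stream of (doc_id, 2**layer).
def sliceGens : List (List Int) → Nat → List (List (Int × Int))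
  | [], _ => []
  | bm :: rest, layer => bm.map (fun doc => (doc, (2 : Int) ^ layer)) :: sliceGens rest (layer + 1)

-- itertools.groupby + per-group sum: accumulate the run of the current key, emit on key change.
def groupAux (key acc : Int) : List (Int × Int) → List (Int × Int)
  | [] => [(key, acc)]
  | (k, w) :: rest => if k = key then groupAux key (acc + w) rest else (key, acc) :: groupAux k w rest

def weight_bitslice (bitslice : List (List Int)) : List (Int × Int) :=
  -- heapq.merge ported as a left fold of binary stable merges (List.merge): each step takes the
  -- smaller current head, ties to the earlier stream — heapq.merge's pop order on every input.
  match (sliceGens bitslice 0).foldl (fun acc s => List.merge acc s pyTupleLE) [] with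
  | [] => []
  | (k, w) :: rest => groupAux k w rest

-- ===== PORT B =====
-- Python tuple comparison (doc_id, weight) < (doc_id', weight'): strict lexicographic.
def pyTupleLT (q p : Int × Int) : Bool := decide (q.1 < p.1) || (decide (q.1 = p.1) && decide (q.2 < p.2))

-- the best-head scan of the while-loop: Source B keeps an index pos[j] into each stream; the port
-- carries each stream's remaining suffix streams[j][pos[j]:] instead, so advancing pos[best] is
-- dropping the chosen head. popMin? performs the same comparisons: it returns the first minimal
-- current head (strict '<' keeps the earliest stream on ties) with the updated suffixes, or
-- none when every stream is exhausted (best < 0).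
def popMin? : List (List (Int × Int)) → Option ((Int × Int) × List (List (Int × Int)))
  | [] => none
  | [] :: rest => (popMin? rest).map (fun r => (r.1, [] :: r.2))
  | (p :: s) :: rest =>
      match popMin? rest with
      | some (q, rest') => if pyTupleLT q p then some (q, (p :: s) :: rest') else some (p, s :: rest)
      | none => some (p, s :: rest)

def totalLen (ls : List (List (Int × Int))) : Nat := (ls.map List.length).sum

-- the 'while True' loop; fuel = total number of stream elements (each successful _pop_min
-- removes exactly one element, so popMin? always returns none before the fuel runs out).
-- cur is the (key, total) accumulator; none while 'have' is still False.
def selLoop : Nat → List (List (Int × Int)) → Option (Int × Int) → List (Int × Int)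
  | 0, _, cur => cur.toList
  | n + 1, rests, cur =>
      match popMin? rests with
      | none => cur.toList
      | some ((d, w), rests') =>
          match cur with
          | some (k, t) =>
              if d = k then selLoop n rests' (some (k, t + w))
              else (k, t) :: selLoop n rests' (some (d, w))
          | none => selLoop n rests' (some (d, w))

def weight_bitslice_alt (bitslice : List (List Int)) : List (Int × Int) :=
  -- 'streams = [[(doc_id, 2 ** layer) for doc_id in bm] for layer, bm in enumerate(bitslice)]'
  -- (enumerate indices are ≥ 0, so 2 ** layer is ported exactly via .toNat)
  let rests := (PySem.List.enumerate bitslice 0).map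
    (fun lb => lb.2.map (fun doc => (doc, (2 : Int) ^ lb.1.toNat)))
  selLoop (totalLen rests) rests none

-- ===== PRECONDITION & SPEC =====
def Spec_weight_bitslice (bitslice : List (List Int)) (out : List (Int × Int)) : Prop := out = weight_bitslice_alt bitslice
instance (bitslice : List (List Int)) (out : List (Int × Int)) : Decidable (Spec_weight_bitslice bitslice out) := by unfold Spec_weight_bitslice; infer_instance

-- ===== CLAIM (what is proved, stated in full; the proofs are below) =====
def Claim_equal_weight_bitslice : Prop := ∀ (bitslice : List (List Int)), Dom_weight_bitslice bitslice → Spec_weight_bitslice bitslice (weight_bitslice bitslice)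

-- ===== LEMMAS AND PROOFS =====

theorem pyTupleLT_eq_not_le (q p : Int × Int) : pyTupleLT q p = !pyTupleLE p q := by
  simp only [pyTupleLT, pyTupleLE]
  rw [Bool.eq_iff_iff]
  simp only [Bool.not_eq_true', Bool.or_eq_false_iff, Bool.and_eq_false_iff,
    decide_eq_false_iff_not, decide_eq_true_eq, Bool.or_eq_true, Bool.and_eq_true]
  omega

theorem pyTupleLT_trans {q b a : Int × Int}
    (h1 : pyTupleLT q b = true) (h2 : pyTupleLT b a = true) : pyTupleLT q a = true := by
  simp only [pyTupleLT, Bool.or_eq_true, Bool.and_eq_true, decide_eq_true_eq] at *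
  omega

theorem popMin?_totalLen :
    ∀ (ls : List (List (Int × Int))) (p : Int × Int) (ls' : List (List (Int × Int))),
    popMin? ls = some (p, ls') → totalLen ls = totalLen ls' + 1 := by
  intro ls
  induction ls with
  | nil => intro p ls' h; simp [popMin?] at h
  | cons s rest ih =>
      intro p ls' h
      match s with
      | [] =>
          simp only [popMin?, Option.map_eq_some_iff] at h
          obtain ⟨⟨q, r'⟩, hr, he⟩ := h
          cases he
          have := ih q r' hr
          simp only [totalLen, List.map_cons, List.sum_cons] at *
          omega
      | a :: s' =>
          simp only [popMin?] at h
          rcases hr : popMin? rest with _ | ⟨⟨q, r'⟩⟩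
          · simp only [hr] at h
            cases h
            simp only [totalLen, List.map_cons, List.sum_cons, List.length_cons]
            omega
          · simp only [hr] at h
            have := ih q r' hr
            by_cases hq : pyTupleLT q a = true
            · rw [if_pos hq] at h
              cases h
              simp only [totalLen, List.map_cons, List.sum_cons] at *
              omega
            · rw [if_neg hq] at h
              cases h
              simp only [totalLen, List.map_cons, List.sum_cons, List.length_cons]
              omega

-- the selection-merge stream, by well-founded recursion on the remaining element count
def selMergeF (ls : List (List (Int × Int))) : List (Int × Int) :=
  match h : popMin? ls with
  | none => []
  | some (p, ls') => p :: selMergeF ls'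
termination_by totalLen ls
decreasing_by
  have := popMin?_totalLen ls p ls' h
  omega

theorem selMergeF_eq (ls : List (List (Int × Int))) :
    selMergeF ls = match popMin? ls with
      | none => []
      | some (p, ls') => p :: selMergeF ls' := by
  rw [selMergeF.eq_def]
  rcases hp : popMin? ls with _ | ⟨⟨p, ls'⟩⟩ <;> simp

-- fueled twin of selMergeF (the stream selLoop walks through)
def selMergeN : Nat → List (List (Int × Int)) → List (Int × Int)
  | 0, _ => []
  | n + 1, ls =>
      match popMin? ls with
      | none => []
      | some (p, ls') => p :: selMergeN n ls'

theorem selMergeN_eq_selMergeF :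
    ∀ (n : Nat) (ls : List (List (Int × Int))), totalLen ls ≤ n → selMergeN n ls = selMergeF ls := by
  intro n
  induction n with
  | zero =>
      intro ls h
      rw [selMergeF_eq]
      rcases hp : popMin? ls with _ | ⟨⟨p, ls'⟩⟩
      · rfl
      · have := popMin?_totalLen ls p ls' hp
        omega
  | succ n ih =>
      intro ls h
      rw [selMergeF_eq]
      simp only [selMergeN]
      rcases hp : popMin? ls with _ | ⟨⟨p, ls'⟩⟩
      · rfl
      · have := popMin?_totalLen ls p ls' hp
        show p :: selMergeN n ls' = p :: selMergeF ls'
        rw [ih ls' (by omega)]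

-- the fused loop is the groupby-style grouping of the selection-merge stream
theorem selLoop_group :
    ∀ (n : Nat) (ls : List (List (Int × Int))),
    (∀ k t : Int, selLoop n ls (some (k, t)) = groupAux k t (selMergeN n ls)) ∧
    (selLoop n ls none = match selMergeN n ls with
      | [] => []
      | (d, w) :: l => groupAux d w l) := by
  intro n
  induction n with
  | zero => intro ls; exact ⟨fun k t => rfl, rfl⟩
  | succ n ih =>
      intro ls
      constructor
      · intro k t
        simp only [selLoop, selMergeN]
        rcases hp : popMin? ls with _ | ⟨⟨⟨d, w⟩, ls'⟩⟩
        · rfl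
        · simp only [groupAux]
          by_cases hd : d = k
          · rw [if_pos hd, if_pos hd, (ih ls').1]
          · rw [if_neg hd, if_neg hd, (ih ls').1]
      · simp only [selLoop, selMergeN]
        rcases hp : popMin? ls with _ | ⟨⟨⟨d, w⟩, ls'⟩⟩
        · rfl
        · exact (ih ls').1 d w

-- branch values of popMin? (plain rewriting forms of its definition)
theorem popMin?_nil_cons (ls : List (List (Int × Int))) :
    popMin? ([] :: ls) = (popMin? ls).map (fun r => (r.1, [] :: r.2)) := rfl

theorem popMin?_cons_of_none (a : Int × Int) (s : List (Int × Int))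
    (rest : List (List (Int × Int))) (hp : popMin? rest = none) :
    popMin? ((a :: s) :: rest) = some (a, s :: rest) := by
  simp [popMin?, hp]

theorem popMin?_cons_of_some (a : Int × Int) (s : List (Int × Int))
    (rest : List (List (Int × Int))) (q : Int × Int) (rest' : List (List (Int × Int)))
    (hp : popMin? rest = some (q, rest')) :
    popMin? ((a :: s) :: rest) =
      if pyTupleLT q a = true then some (q, (a :: s) :: rest') else some (a, s :: rest) := by
  simp [popMin?, hp]

theorem pyTupleLE_trans {a b c : Int × Int}
    (h1 : pyTupleLE a b = true) (h2 : pyTupleLE b c = true) : pyTupleLE a c = true := by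
  simp only [pyTupleLE, Bool.or_eq_true, Bool.and_eq_true, decide_eq_true_eq] at *
  omega

theorem not_pyTupleLT_iff_le (q p : Int × Int) :
    (¬ pyTupleLT q p = true) ↔ pyTupleLE p q = true := by
  rw [pyTupleLT_eq_not_le]
  cases pyTupleLE p q <;> simp

-- a leading exhausted stream is transparent to every pop
theorem selMergeF_nil_cons (ls : List (List (Int × Int))) :
    selMergeF ([] :: ls) = selMergeF ls := by
  induction hn : totalLen ls using Nat.strong_induction_on generalizing ls with
  | _ n ih =>
      rw [selMergeF_eq, selMergeF_eq ls, popMin?_nil_cons]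
      rcases hp : popMin? ls with _ | ⟨⟨p, ls'⟩⟩
      · rfl
      · have hlen := popMin?_totalLen ls p ls' hp
        exact congrArg (p :: ·) (ih (totalLen ls') (by omega) ls' rfl)

-- KEY LEMMA: replacing the two front streams by their binary stable merge does not change
-- the selection-merge stream (both expose elements in min-head order, ties to the left).
theorem selMergeF_merge :
    ∀ (n : Nat) (A B : List (Int × Int)) (rest : List (List (Int × Int))),
    totalLen (A :: B :: rest) ≤ n →
    selMergeF (List.merge A B pyTupleLE :: rest) = selMergeF (A :: B :: rest) := by
  intro n
  induction n with
  | zero =>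
      intro A B rest h
      match A, B with
      | [], B => rw [List.nil_merge, selMergeF_nil_cons]
      | a :: A', B => simp [totalLen] at h
  | succ n ih =>
      intro A B rest h
      match A, B with
      | [], B =>
          rw [List.nil_merge, selMergeF_nil_cons]
      | a :: A', [] =>
          rw [List.merge_right]
          have hlen1 : totalLen (A' :: [] :: rest) ≤ n := by
            simp only [totalLen, List.map_cons, List.sum_cons, List.length_cons,
              List.length_nil] at h ⊢
            omega
          have hIH1 := ih A' [] rest hlen1
          rw [List.merge_right] at hIH1
          rw [selMergeF_eq ((a :: A') :: rest), selMergeF_eq ((a :: A') :: [] :: rest)]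
          rcases hp : popMin? rest with _ | ⟨⟨q, rest'⟩⟩
          · have hR : popMin? ([] :: rest) = none := by rw [popMin?_nil_cons, hp]; rfl
            rw [popMin?_cons_of_none a A' rest hp, popMin?_cons_of_none a A' ([] :: rest) hR]
            exact congrArg (a :: ·) hIH1
          · have hR : popMin? ([] :: rest) = some (q, [] :: rest') := by
              rw [popMin?_nil_cons, hp]; rfl
            rw [popMin?_cons_of_some a A' rest q rest' hp,
              popMin?_cons_of_some a A' ([] :: rest) q ([] :: rest') hR]
            by_cases hq : pyTupleLT q a = true
            · rw [if_pos hq, if_pos hq]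
              have hlen2 : totalLen ((a :: A') :: [] :: rest') ≤ n := by
                have := popMin?_totalLen rest q rest' hp
                simp only [totalLen, List.map_cons, List.sum_cons, List.length_cons,
                  List.length_nil] at h this ⊢
                omega
              have hIH2 := ih (a :: A') [] rest' hlen2
              rw [List.merge_right] at hIH2
              exact congrArg (q :: ·) hIH2
            · rw [if_neg hq, if_neg hq]
              exact congrArg (a :: ·) hIH1
      | a :: A', b :: B' =>
          rw [List.cons_merge_cons]
          have hlenA : totalLen (A' :: (b :: B') :: rest) ≤ n := by
            simp only [totalLen, List.map_cons, List.sum_cons, List.length_cons] at h ⊢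
            omega
          have hlenB : totalLen ((a :: A') :: B' :: rest) ≤ n := by
            simp only [totalLen, List.map_cons, List.sum_cons, List.length_cons] at h ⊢
            omega
          by_cases hab : pyTupleLE a b = true
          · rw [if_pos hab]
            have hba : ¬ pyTupleLT b a = true := (not_pyTupleLT_iff_le b a).mpr hab
            rw [selMergeF_eq, selMergeF_eq ((a :: A') :: (b :: B') :: rest)]
            rcases hp : popMin? rest with _ | ⟨⟨q, rest'⟩⟩
            · have hR1 : popMin? ((b :: B') :: rest) = some (b, B' :: rest) :=
                popMin?_cons_of_none b B' rest hp
              rw [popMin?_cons_of_none a _ rest hp,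
                popMin?_cons_of_some a A' ((b :: B') :: rest) b (B' :: rest) hR1, if_neg hba]
              exact congrArg (a :: ·) (ih A' (b :: B') rest hlenA)
            · have hlen' : totalLen ((a :: A') :: (b :: B') :: rest') ≤ n := by
                have := popMin?_totalLen rest q rest' hp
                simp only [totalLen, List.map_cons, List.sum_cons, List.length_cons] at h this ⊢
                omega
              rw [popMin?_cons_of_some a _ rest q rest' hp]
              by_cases hqb : pyTupleLT q b = true
              · have hR1 : popMin? ((b :: B') :: rest) = some (q, (b :: B') :: rest') := by
                  rw [popMin?_cons_of_some b B' rest q rest' hp, if_pos hqb]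
                rw [popMin?_cons_of_some a A' ((b :: B') :: rest) q ((b :: B') :: rest') hR1]
                by_cases hqa : pyTupleLT q a = true
                · rw [if_pos hqa, if_pos hqa]
                  have := ih (a :: A') (b :: B') rest' hlen'
                  rw [List.cons_merge_cons, if_pos hab] at this
                  exact congrArg (q :: ·) this
                · rw [if_neg hqa, if_neg hqa]
                  exact congrArg (a :: ·) (ih A' (b :: B') rest hlenA)
              · have hqa : ¬ pyTupleLT q a = true :=
                  (not_pyTupleLT_iff_le q a).mpr
                    (pyTupleLE_trans hab ((not_pyTupleLT_iff_le q b).mp hqb))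
                have hR1 : popMin? ((b :: B') :: rest) = some (b, B' :: rest) := by
                  rw [popMin?_cons_of_some b B' rest q rest' hp, if_neg hqb]
                rw [popMin?_cons_of_some a A' ((b :: B') :: rest) b (B' :: rest) hR1]
                rw [if_neg hqa, if_neg hba]
                exact congrArg (a :: ·) (ih A' (b :: B') rest hlenA)
          · rw [if_neg hab]
            have hba : pyTupleLT b a = true := by
              rw [pyTupleLT_eq_not_le, Bool.not_eq_true']
              exact Bool.eq_false_iff.mpr hab
            rw [selMergeF_eq, selMergeF_eq ((a :: A') :: (b :: B') :: rest)]
            rcases hp : popMin? rest with _ | ⟨⟨q, rest'⟩⟩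
            · have hR1 : popMin? ((b :: B') :: rest) = some (b, B' :: rest) :=
                popMin?_cons_of_none b B' rest hp
              rw [popMin?_cons_of_none b _ rest hp,
                popMin?_cons_of_some a A' ((b :: B') :: rest) b (B' :: rest) hR1, if_pos hba]
              exact congrArg (b :: ·) (ih (a :: A') B' rest hlenB)
            · have hlen' : totalLen ((a :: A') :: (b :: B') :: rest') ≤ n := by
                have := popMin?_totalLen rest q rest' hp
                simp only [totalLen, List.map_cons, List.sum_cons, List.length_cons] at h this ⊢
                omega
              rw [popMin?_cons_of_some b _ rest q rest' hp]
              by_cases hqb : pyTupleLT q b = true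
              · have hqa : pyTupleLT q a = true := pyTupleLT_trans hqb hba
                have hR1 : popMin? ((b :: B') :: rest) = some (q, (b :: B') :: rest') := by
                  rw [popMin?_cons_of_some b B' rest q rest' hp, if_pos hqb]
                rw [popMin?_cons_of_some a A' ((b :: B') :: rest) q ((b :: B') :: rest') hR1]
                rw [if_pos hqb, if_pos hqa]
                have := ih (a :: A') (b :: B') rest' hlen'
                rw [List.cons_merge_cons, if_neg hab] at this
                exact congrArg (q :: ·) this
              · have hR1 : popMin? ((b :: B') :: rest) = some (b, B' :: rest) := by
                  rw [popMin?_cons_of_some b B' rest q rest' hp, if_neg hqb]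
                rw [popMin?_cons_of_some a A' ((b :: B') :: rest) b (B' :: rest) hR1]
                rw [if_neg hqb, if_pos hba]
                exact congrArg (b :: ·) (ih (a :: A') B' rest hlenB)

-- a single stream pops out in order
theorem selMergeF_single (s : List (Int × Int)) : selMergeF [s] = s := by
  induction s with
  | nil => rw [selMergeF_eq]; rfl
  | cons p s' ih =>
      rw [selMergeF_eq, popMin?_cons_of_none p s' [] rfl]
      exact congrArg (p :: ·) ih

-- A's fold of binary merges produces exactly the selection-merge stream
theorem foldl_merge_eq_selMergeF :
    ∀ (ls : List (List (Int × Int))) (acc : List (Int × Int)),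
    ls.foldl (fun a s => List.merge a s pyTupleLE) acc = selMergeF (acc :: ls) := by
  intro ls
  induction ls with
  | nil => intro acc; rw [List.foldl_nil, selMergeF_single]
  | cons s rest ih =>
      intro acc
      rw [List.foldl_cons, ih]
      exact selMergeF_merge (totalLen (acc :: s :: rest)) acc s rest le_rfl

-- B's stream list is A's sliceGens
theorem enumerate_map_eq_sliceGens (bitslice : List (List Int)) :
    ∀ n : Nat, (PySem.List.enumerate bitslice (n : Int)).map
      (fun lb => lb.2.map (fun doc => (doc, (2 : Int) ^ lb.1.toNat))) = sliceGens bitslice n := by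
  induction bitslice with
  | nil => intro n; simp [PySem.List.enumerate_nil, sliceGens]
  | cons bm rest ih =>
      intro n
      rw [PySem.List.enumerate_cons, List.map_cons]
      have : ((n : Int) + 1) = ((n + 1 : Nat) : Int) := by push_cast; ring
      rw [this, ih (n + 1)]
      simp [sliceGens]

-- ===== VERDICT (by name: the statement is the Claim_ definition above) =====
theorem weight_bitslice_spec : Claim_equal_weight_bitslice := by
  intro bitslice _
  unfold Spec_weight_bitslice weight_bitslice weight_bitslice_alt
  have e := enumerate_map_eq_sliceGens bitslice 0
  norm_num at e
  rw [e]
  show _ = selLoop (totalLen (sliceGens bitslice 0)) (sliceGens bitslice 0) none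
  rw [(selLoop_group (totalLen (sliceGens bitslice 0)) (sliceGens bitslice 0)).2]
  rw [selMergeN_eq_selMergeF _ _ le_rfl]
  rw [foldl_merge_eq_selMergeF (sliceGens bitslice 0) []]
  rw [selMergeF_nil_cons]
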